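-- pv_equiv track=rewrite | github.com/Drakonkinst/AdventOfCode | 2023/Day15/puzzle2.py | parse_step
-- ===== SOURCE A (Python) =====
-- def parse_step(step):
--     val = 0
--     for ch in step:
--         asciiVal = ord(ch)
--         val += asciiVal
--         val *= 17
--         val = val % 256
--     return val
-- ===== SOURCE B (Python) =====
-- def parse_step(step):
--     n = len(step)
--     total = 0
--     for i, ch in enumerate(step):
--         total += ord(ch) * pow(17, n - i, 256)
--     return total % 256
-- ===== Notes on version B (the rewrite author's own statement) =====
-- stated objective: alternative
-- what changed: Replaces Horner's rolling hash (add, multiply by 17, reduce mod 256 every iteration) by an expanded positional polynomial: each character contributes ord(ch)*17^(n-i) mod 256, summed in one pass with a single final reduction mod 256.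
import Mathlib
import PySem

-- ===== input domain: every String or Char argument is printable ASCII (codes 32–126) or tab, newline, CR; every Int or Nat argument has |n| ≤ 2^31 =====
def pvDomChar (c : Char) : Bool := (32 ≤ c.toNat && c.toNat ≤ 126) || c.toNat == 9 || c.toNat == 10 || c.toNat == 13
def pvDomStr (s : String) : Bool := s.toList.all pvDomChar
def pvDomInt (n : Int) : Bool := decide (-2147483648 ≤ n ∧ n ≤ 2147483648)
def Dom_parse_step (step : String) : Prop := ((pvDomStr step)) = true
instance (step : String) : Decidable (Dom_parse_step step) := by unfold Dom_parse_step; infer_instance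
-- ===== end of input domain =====

-- B computes the same AoC hash as an expanded positional polynomial (one modulus at the end)
-- instead of A's Horner-style rolling accumulation; objective: alternative (same cost).

-- ===== PORT A =====
def parse_step (step : String) : Int :=
  step.toList.foldl (fun val ch =>
    PySem.Int.mod ((val + (ch.toNat : Int)) * 17) 256) 0

-- ===== PORT B =====
def parse_step_alt (step : String) : Int :=
  let n := step.toList.length
  let total := (PySem.List.enumerate step.toList).foldl
    (fun total p => total + (p.2.toNat : Int) * PySem.Int.powMod 17 (n - p.1.toNat) 256) 0
  PySem.Int.mod total 256

-- ===== PRECONDITION & SPEC =====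
def Spec_parse_step (step : String) (out : Int) : Prop := out = parse_step_alt step
instance (step : String) (out : Int) : Decidable (Spec_parse_step step out) := by unfold Spec_parse_step; infer_instance

-- ===== CLAIM (what is proved, stated in full; the proofs are below) =====
def Claim_equal_parse_step : Prop := ∀ (step : String), Dom_parse_step step → Spec_parse_step step (parse_step step)

-- ===== LEMMAS AND PROOFS =====

-- the exact (un-reduced) positional polynomial both sides compute mod 256
def pvP : List Char → Int
  | [] => 0
  | c :: l => (c.toNat : Int) * 17 ^ (l.length + 1) + pvP l

theorem pvMod_eq (a : Int) : PySem.Int.mod a 256 = a % 256 :=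
  PySem.Int.mod_eq_emod_of_pos (by norm_num)

theorem pvAbsorb (a k d : Int) : (a % 256 * k + d) % 256 = (a * k + d) % 256 := by
  conv_rhs => rw [Int.add_emod, Int.mul_emod]
  conv_lhs => rw [Int.add_emod, Int.mul_emod, Int.emod_emod_of_dvd _ dvd_rfl]

theorem pvAddCongr (x x' y y' : Int) (hx : x % 256 = x' % 256) (hy : y % 256 = y' % 256) :
    (x + y) % 256 = (x' + y') % 256 := by
  rw [Int.add_emod, hx, hy, ← Int.add_emod]

theorem pvA_foldl : ∀ (l : List Char) (v : Int), 0 ≤ v → v < 256 →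
    l.foldl (fun val ch => PySem.Int.mod ((val + (ch.toNat : Int)) * 17) 256) v
      = (v * 17 ^ l.length + pvP l) % 256 := by
  intro l
  induction l with
  | nil =>
    intro v h0 h1
    simp [pvP]
    omega
  | cons c l ih =>
    intro v h0 h1
    simp only [List.foldl_cons]
    rw [ih _ (by rw [pvMod_eq]; exact Int.emod_nonneg _ (by norm_num))
          (by rw [pvMod_eq]; exact Int.emod_lt_of_pos _ (by norm_num))]
    rw [pvMod_eq, pvAbsorb]
    simp only [pvP, List.length_cons]
    ring_nf

theorem pvFoldl_add (g : Int × Char → Int) :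
    ∀ (l : List (Int × Char)) (v : Int),
      l.foldl (fun t p => t + g p) v = v + (l.map g).sum := by
  intro l
  induction l with
  | nil => intro v; simp
  | cons p l ih => intro v; simp [ih]; ring

theorem pvB_sum : ∀ (l : List Char) (s n : Nat), n = s + l.length →
    ((PySem.List.enumerate l (s : Int)).map
      (fun p => (p.2.toNat : Int) * PySem.Int.powMod 17 (n - p.1.toNat) 256)).sum % 256
      = pvP l % 256 := by
  intro l
  induction l with
  | nil => intro s n _; simp [PySem.List.enumerate_nil, pvP]
  | cons c l ih =>
    intro s n hn
    rw [PySem.List.enumerate_cons]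
    have hs1 : (s : Int) + 1 = ((s + 1 : Nat) : Int) := by push_cast; ring
    rw [List.map_cons, List.sum_cons, hs1]
    have hrest := ih (s + 1) n (by simp [List.length_cons] at hn; omega)
    have hexp : n - ((s : Int)).toNat = l.length + 1 := by
      simp [List.length_cons] at hn; simp; omega
    apply pvAddCongr
    · simp only [hexp, PySem.Int.powMod, pvMod_eq]
      conv_lhs => rw [Int.mul_emod, Int.emod_emod_of_dvd _ dvd_rfl, ← Int.mul_emod]
    · exact hrest

-- ===== VERDICT (by name: the statement is the Claim_ definition above) =====
theorem parse_step_spec : Claim_equal_parse_step := by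
  intro step _
  unfold Spec_parse_step parse_step parse_step_alt
  dsimp only
  rw [pvA_foldl _ 0 le_rfl (by norm_num)]
  rw [pvFoldl_add, pvMod_eq, zero_add]
  have hb := pvB_sum step.toList 0 step.toList.length (by simp)
  simp only [Nat.cast_zero] at hb
  rw [hb]
  simp
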